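-- pv_equiv track=rewrite | github.com/Vishal-O4/Projects | FLAMES.py | name_count
-- ===== SOURCE A (Python) =====
-- from collections import Counter
--
-- def name_count(n1, n2):
--     n3 = n1 + n2
--     n = Counter(n3)
--     count = 0
--     for a, num in n.items():
--         if num == 1:
--             count += 1
--     return count
-- ===== SOURCE B (Python) =====
-- def name_count(n1, n2):
--     s = sorted(n1 + n2)
--     count = 0
--     i = 0
--     n = len(s)
--     while i < n:
--         j = i + 1
--         while j < n and s[j] == s[i]:
--             j += 1
--         if j - i == 1:
--             count += 1
--         i = j
--     return count
-- ===== Notes on version B (the rewrite author's own statement) =====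
-- stated objective: alternative
-- what changed: Replaced the Counter frequency table and items() scan by sort-then-single-scan: sort the concatenation and count maximal runs of length exactly 1.
import Mathlib
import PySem

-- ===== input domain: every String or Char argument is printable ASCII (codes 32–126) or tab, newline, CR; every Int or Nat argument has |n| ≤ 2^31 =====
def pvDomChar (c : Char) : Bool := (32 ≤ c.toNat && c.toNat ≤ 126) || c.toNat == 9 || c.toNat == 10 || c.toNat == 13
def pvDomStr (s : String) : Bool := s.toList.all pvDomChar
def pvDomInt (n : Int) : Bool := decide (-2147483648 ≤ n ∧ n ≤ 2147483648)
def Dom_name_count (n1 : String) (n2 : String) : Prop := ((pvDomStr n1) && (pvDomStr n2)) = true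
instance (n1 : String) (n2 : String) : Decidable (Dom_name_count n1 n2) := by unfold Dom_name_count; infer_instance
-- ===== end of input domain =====

-- B replaces A's Counter frequency table + items() scan by sort-then-single-scan over runs (alternative algorithm, same result).

-- ===== PORT A =====
-- n3 = n1 + n2; n = Counter(n3); count items with num == 1
def name_count (n1 : String) (n2 : String) : Int :=
  let n3 := n1.toList ++ n2.toList
  let n := PySem.Dict.counter n3
  n.items.foldl (fun count p => if p.2 == 1 then count + 1 else count) 0

-- ===== PORT B =====
-- the outer while loop of Source B: each step consumes one maximal run of equal chars of the
-- sorted list (inner while = takeWhile/dropWhile of the head) and counts the singleton runs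
def ncRuns : List Char → Int
  | [] => 0
  | c :: rest =>
    (if rest.takeWhile (· == c) = [] then 1 else 0) + ncRuns (rest.dropWhile (· == c))
termination_by s => s.length
decreasing_by
  have := List.length_dropWhile_le (· == c) rest
  simp; omega

def name_count_alt (n1 : String) (n2 : String) : Int :=
  ncRuns (PySem.List.sorted (n1.toList ++ n2.toList) (fun c => c) false)

-- ===== PRECONDITION & SPEC =====
def Spec_name_count (n1 : String) (n2 : String) (out : Int) : Prop := out = name_count_alt n1 n2
instance (n1 : String) (n2 : String) (out : Int) : Decidable (Spec_name_count n1 n2 out) := by unfold Spec_name_count; infer_instance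

-- ===== CLAIM (what is proved, stated in full; the proofs are below) =====
def Claim_equal_name_count : Prop := ∀ (n1 : String) (n2 : String), Dom_name_count n1 n2 → Spec_name_count n1 n2 (name_count n1 n2)

-- ===== LEMMAS AND PROOFS =====

-- the common value both ports compute: the number of distinct chars of l occurring exactly once
def distinctOnce (l : List Char) : Int :=
  ((PySem.List.dedup l).countP (fun k => l.count k == 1) : Int)

lemma countP_eq_of_nodup_mem (xs ys : List Char) (p : Char → Bool)
    (hx : xs.Nodup) (hy : ys.Nodup) (h : ∀ a, a ∈ xs ↔ a ∈ ys) :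
    xs.countP p = ys.countP p :=
  ((List.perm_ext_iff_of_nodup hx hy).2 h).countP_eq p

lemma A_eq (n1 n2 : String) : name_count n1 n2 = distinctOnce (n1.toList ++ n2.toList) := by
  unfold name_count distinctOnce
  dsimp only
  rw [PySem.Dict.items_counter, List.foldl_map, PySem.List.foldl_if_add_one]
  simp [PySem.List.dedup_eq_ofList]
  congr 1
  funext k
  simp
  omega

-- in a ≤-sorted list, the head's value never reappears after its initial run is dropped
lemma not_mem_dropWhile_of_sorted (c : Char) (l : List Char)
    (h : l.Pairwise (· ≤ ·)) (hle : ∀ x ∈ l, c ≤ x) : c ∉ l.dropWhile (· == c) := by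
  induction l with
  | nil => simp
  | cons a t IH =>
    by_cases ha : (a == c) = true
    · rw [List.dropWhile_cons]
      simp only [ha, if_true]
      exact IH (List.Pairwise.of_cons h) (fun x hx => hle x (List.mem_cons_of_mem _ hx))
    · rw [List.dropWhile_cons]
      simp only [ha]
      intro hmem
      have hac : a ≠ c := by simpa using ha
      have hca : c ≤ a := hle a List.mem_cons_self
      rcases List.mem_cons.1 hmem with rfl | hmem'
      · exact hac rfl
      · exact hac (le_antisymm ((List.pairwise_cons.1 h).1 c hmem') hca)

-- run scan on a sorted list counts exactly the distinct elements of count 1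
lemma ncRuns_sorted (s : List Char) (h : s.Pairwise (· ≤ ·)) : ncRuns s = distinctOnce s := by
  induction s using ncRuns.induct with
  | case1 => simp [ncRuns, distinctOnce, PySem.List.dedup]
  | case2 c rest IH =>
    obtain ⟨hc, hrest⟩ := List.pairwise_cons.1 h
    set tw := rest.takeWhile (· == c) with htwdef
    set dw := rest.dropWhile (· == c) with hdwdef
    have hsplit : tw ++ dw = rest := List.takeWhile_append_dropWhile
    have hdwp : dw.Pairwise (· ≤ ·) := List.Pairwise.sublist (List.dropWhile_sublist _) hrest
    have htw : ∀ x ∈ tw, x = c := by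
      intro x hx
      have := List.mem_takeWhile_imp hx
      simpa using this
    have hcnotdw : c ∉ dw := not_mem_dropWhile_of_sorted c rest hrest hc
    have hcount_c : (c :: rest).count c = 1 + tw.length := by
      rw [List.count_cons_self, ← hsplit, List.count_append]
      have h1 : tw.count c = tw.length := List.count_eq_length.2 (fun b hb => by simp [htw b hb])
      have h2 : dw.count c = 0 := List.count_eq_zero.2 hcnotdw
      omega
    have hcount_k : ∀ k ∈ dw, (c :: rest).count k = dw.count k := by
      intro k hk
      have hkc : k ≠ c := fun hkc => hcnotdw (hkc ▸ hk)
      have hck : ¬ c = k := fun e => hkc e.symm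
      rw [← hsplit]
      have h1 : tw.count k = 0 := List.count_eq_zero.2 (fun hktw => hkc (htw k hktw))
      simp [List.count_append, h1, hck]
    have hmem : ∀ x, x ∈ (c :: rest) ↔ x = c ∨ x ∈ dw := by
      intro x
      rw [← hsplit]
      constructor
      · intro hx
        rcases List.mem_cons.1 hx with h1 | h1
        · exact Or.inl h1
        · rcases List.mem_append.1 h1 with h2 | h2
          · exact Or.inl (htw x h2)
          · exact Or.inr h2
      · rintro (rfl | hx)
        · exact List.mem_cons_self
        · exact List.mem_cons_of_mem _ (List.mem_append_right _ hx)
    have key : distinctOnce (c :: rest)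
        = (if tw = [] then 1 else 0) + distinctOnce dw := by
      unfold distinctOnce
      have hstep1 : (PySem.List.dedup (c :: rest)).countP (fun k => (c :: rest).count k == 1)
          = (c :: PySem.List.dedup dw).countP (fun k => (c :: rest).count k == 1) := by
        apply countP_eq_of_nodup_mem
        · exact PySem.List.nodup_dedup _
        · exact List.nodup_cons.2 ⟨fun hcd => hcnotdw ((PySem.List.mem_dedup _ _).1 hcd),
            PySem.List.nodup_dedup _⟩
        · intro a
          rw [PySem.List.mem_dedup, hmem a, List.mem_cons, PySem.List.mem_dedup]
      rw [hstep1, List.countP_cons]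
      have hstep2 : (PySem.List.dedup dw).countP (fun k => (c :: rest).count k == 1)
          = (PySem.List.dedup dw).countP (fun k => dw.count k == 1) := by
        apply List.countP_congr
        intro k hk
        rw [hcount_k k ((PySem.List.mem_dedup _ _).1 hk)]
      rw [hstep2]
      have hcond : (List.count c (c :: rest) == 1) = decide (tw = []) := by
        rw [hcount_c]
        by_cases htwnil : tw = []
        · simp [htwnil]
        · have hlen : tw.length ≠ 0 := by simpa [List.length_eq_zero_iff] using htwnil
          simp [htwnil]
      rw [hcond]
      by_cases htwnil : tw = [] <;> simp [htwnil] <;> omega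
    rw [ncRuns, key, IH hdwp]

lemma distinctOnce_perm (s l : List Char) (hperm : s.Perm l) : distinctOnce s = distinctOnce l := by
  unfold distinctOnce
  have h1 : (PySem.List.dedup s).countP (fun k => s.count k == 1)
      = (PySem.List.dedup s).countP (fun k => l.count k == 1) := by
    apply List.countP_congr
    intro k _
    rw [hperm.count_eq]
  rw [h1]
  congr 1
  apply countP_eq_of_nodup_mem _ _ _ (PySem.List.nodup_dedup _) (PySem.List.nodup_dedup _)
  intro a
  rw [PySem.List.mem_dedup, PySem.List.mem_dedup, hperm.mem_iff]

lemma B_eq (n1 n2 : String) : name_count_alt n1 n2 = distinctOnce (n1.toList ++ n2.toList) := by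
  unfold name_count_alt
  have hs : (PySem.List.sorted (n1.toList ++ n2.toList) (fun c => c) false).Pairwise (· ≤ ·) := by
    have := PySem.List.sorted_pairwise (n1.toList ++ n2.toList) (fun c => c)
    simpa using this
  rw [ncRuns_sorted _ hs]
  exact distinctOnce_perm _ _ (PySem.List.sorted_perm _ _ _)

-- ===== VERDICT (by name: the statement is the Claim_ definition above) =====
theorem name_count_spec : Claim_equal_name_count := by
  intro n1 n2 _
  unfold Spec_name_count
  rw [A_eq, B_eq]
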